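-- pv_equiv track=rewrite | github.com/pctp/quotesys | function.py | be_apart_from
-- ===== SOURCE A (Python) =====
-- def be_apart_from(series):
--     assert isinstance(series, list)
--     assert series.__len__() > 0
--
--     i = series.__len__() - 1
--
--     while i >= 0:
--
--         if series[i] is True:
--             return series.__len__() - i
--
--         i -= 1
--
--     return None
-- ===== SOURCE B (Python) =====
-- def be_apart_from(series):
--     last = None
--     i = 0
--     for v in series:
--         if v is True:
--             last = i
--         i += 1
--     if last is None:
--         return None
--     return len(series) - last
-- ===== Notes on version B (the rewrite author's own statement) =====
-- stated objective: alternative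
-- what changed: Single forward pass keeping the last-seen True index instead of A's backward scan with early return; B also drops the asserts, returning None on the empty list where A raises AssertionError.
import Mathlib
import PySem

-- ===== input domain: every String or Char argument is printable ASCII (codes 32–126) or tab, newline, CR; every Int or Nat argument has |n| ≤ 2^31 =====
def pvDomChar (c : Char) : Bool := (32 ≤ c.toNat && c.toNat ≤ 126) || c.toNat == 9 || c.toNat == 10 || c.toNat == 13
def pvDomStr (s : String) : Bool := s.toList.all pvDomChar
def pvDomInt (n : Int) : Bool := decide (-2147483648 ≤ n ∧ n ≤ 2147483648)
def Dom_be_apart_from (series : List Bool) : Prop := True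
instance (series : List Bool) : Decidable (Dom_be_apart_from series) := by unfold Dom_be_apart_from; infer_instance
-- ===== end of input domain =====

-- B replaces A's backward scan with early return by a single forward pass that keeps the
-- index of the last True seen; on the empty list A raises (assert) while B returns none.

-- ===== PORT A =====
-- A's while-loop runs i from len-1 down to 0; fuel k encodes i = k-1.
def beApartLoopA (series : List Bool) (n : Int) : Nat → Option Int
  | 0 => none
  | k + 1 =>
    if PySem.List.pyGet? series (k : Int) == some true then some (n - (k : Int))
    else beApartLoopA series n k

def be_apart_from (series : List Bool) : Option Int :=
  beApartLoopA series (series.length : Int) series.length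

-- ===== PORT B =====
-- B's for-loop: forward over the list with a running index and a last-seen accumulator.
def beApartLoopB (l : List Bool) (i : Nat) (last : Option Nat) : Option Nat :=
  match l with
  | [] => last
  | b :: t => beApartLoopB t (i + 1) (if b = true then some i else last)

def be_apart_from_alt (series : List Bool) : Option Int :=
  match beApartLoopB series 0 none with
  | none => none
  | some j => some ((series.length : Int) - (j : Int))

-- ===== PRECONDITION & SPEC =====
-- Pre_ excludes exactly the empty list, on which A's 'assert series.__len__() > 0' raises.
def Pre_be_apart_from (series : List Bool) : Prop := series ≠ []
instance (series : List Bool) : Decidable (Pre_be_apart_from series) := by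
  unfold Pre_be_apart_from; infer_instance

def pvWitness_be_apart_from : List Bool := [false, true, false]

def Spec_be_apart_from (series : List Bool) (out : Option Int) : Prop := out = be_apart_from_alt series
instance (series : List Bool) (out : Option Int) : Decidable (Spec_be_apart_from series out) := by
  unfold Spec_be_apart_from; infer_instance

-- ===== CLAIM =====
def Claim_equal_be_apart_from : Prop := ∀ (series : List Bool), Dom_be_apart_from series → Pre_be_apart_from series → Spec_be_apart_from series (be_apart_from series)

-- ===== LEMMAS AND PROOFS =====

-- index of the last True element of a list, relative to its head
def lastTrueIdx : List Bool → Option Nat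
  | [] => none
  | b :: t =>
    match lastTrueIdx t with
    | some j => some (j + 1)
    | none => if b then some 0 else none

theorem lastTrueIdx_append_singleton (l : List Bool) (b : Bool) :
    lastTrueIdx (l ++ [b]) = if b then some l.length else lastTrueIdx l := by
  induction l with
  | nil => cases b <;> simp [lastTrueIdx]
  | cons a t ih =>
    cases b with
    | true => simp [lastTrueIdx, ih]
    | false =>
      simp only [List.cons_append, lastTrueIdx, ih, Bool.false_eq_true, if_false]

-- B's loop computes the last-True index (shifted by the starting counter).
theorem beApartLoopB_eq (t : List Bool) (i : Nat) (last : Option Nat) :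
    beApartLoopB t i last =
      match lastTrueIdx t with
      | some j => some (i + j)
      | none => last := by
  induction t generalizing i last with
  | nil => rfl
  | cons b s ih =>
    simp only [beApartLoopB, lastTrueIdx, ih]
    cases hs : lastTrueIdx s with
    | some j => simp [Nat.add_assoc, Nat.add_comm 1 j]
    | none => cases b <;> simp

-- A's loop over the first k elements computes the last-True index of the k-prefix.
theorem beApartLoopA_eq (series : List Bool) (n : Int) :
    ∀ k, k ≤ series.length →
      beApartLoopA series n k = (lastTrueIdx (series.take k)).map (fun j => n - (j : Int)) := by
  intro k
  induction k with
  | zero => intro _; rfl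
  | succ k ih =>
    intro hk
    have hklt : k < series.length := by omega
    have htake : series.take (k + 1) = series.take k ++ [series[k]] := by
      rw [List.take_add_one, List.getElem?_eq_getElem hklt]; rfl
    simp only [beApartLoopA, htake, lastTrueIdx_append_singleton,
      PySem.List.pyGet?_natCast, List.getElem?_eq_getElem hklt]
    by_cases hb : series[k] = true
    · simp [hb, List.length_take, Nat.min_eq_left (Nat.le_of_lt hklt)]
    · simp [hb, ih (Nat.le_of_lt hklt)]

-- ===== VERDICT =====
theorem be_apart_from_spec : Claim_equal_be_apart_from := by
  intro series _ _
  unfold Spec_be_apart_from be_apart_from be_apart_from_alt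
  rw [beApartLoopA_eq series (series.length : Int) series.length le_rfl,
    List.take_length, beApartLoopB_eq]
  cases h : lastTrueIdx series <;> simp
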